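-- pv_equiv track=rewrite | github.com/FLIVLA/itu-algorithms-and-datastructures | python/exercises/week2/StringManipulation.py | b_to_alt_zeros_ones
-- ===== SOURCE A (Python) =====
-- def b_to_alt_zeros_ones(s: str) -> str:
--     S = list(s)
--     n = len(S)
--     b = 0                           # track the b's
--     for i in range(n):
--         if S[i] == 'b':
--             S[i] = str(b % 2)       # use modulo to alternate 0 and 1
--             b += 1                  # increment b
--     return "".join(S)
-- ===== SOURCE B (Python) =====
-- def b_to_alt_zeros_ones(s: str) -> str:
--     parts = s.split('b')
--     pieces = [parts[0]]
--     for k, part in enumerate(parts[1:]):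
--         pieces.append(str(k % 2))
--         pieces.append(part)
--     return "".join(pieces)
-- ===== Notes on version B (the rewrite author's own statement) =====
-- stated objective: alternative
-- what changed: B never inspects characters or keeps a counter: it splits the string on 'b' with str.split and rejoins the segments interleaved with the digit of the segment index's parity, whereas A scans character by character mutating a list in place with a running counter.
import Mathlib
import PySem

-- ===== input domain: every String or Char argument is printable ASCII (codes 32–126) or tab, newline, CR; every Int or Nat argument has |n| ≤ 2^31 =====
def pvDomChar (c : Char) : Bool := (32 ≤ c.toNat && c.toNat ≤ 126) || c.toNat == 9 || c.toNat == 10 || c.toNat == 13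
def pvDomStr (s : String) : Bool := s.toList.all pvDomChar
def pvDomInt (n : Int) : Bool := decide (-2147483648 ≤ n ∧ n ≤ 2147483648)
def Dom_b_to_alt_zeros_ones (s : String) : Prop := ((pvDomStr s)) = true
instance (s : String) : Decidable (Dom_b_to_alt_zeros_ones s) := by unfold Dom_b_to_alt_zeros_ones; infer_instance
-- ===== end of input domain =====

-- B splits the string on 'b' and rejoins the segments interleaved with the alternating digit of the
-- segment index, instead of A's character-by-character scan with an in-place running counter (objective: alternative).

-- ===== PORT A =====
def b_to_alt_zeros_ones (s : String) : String :=
  let S := s.toList.map Char.toString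
  let n := PySem.List.len S
  let r := (PySem.List.pyRange 0 n 1).foldl
    (fun (st : List String × Int) i =>
      if PySem.List.pyGetD st.1 i "" = "b"
      then (PySem.List.pySetD st.1 i (PySem.Int.toStr (PySem.Int.mod st.2 2)), st.2 + 1)
      else st)
    (S, 0)
  PySem.Str.join "" r.1

-- ===== PORT B =====
def b_to_alt_zeros_ones_alt (s : String) : String :=
  let parts := (PySem.Str.split? s "b").getD []   -- s.split('b'); sep "b" ≠ "" so split? is some
  let pieces := (PySem.List.enumerate (PySem.List.slice parts (some 1) none) 0).foldl
      (fun (acc : List String) p =>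
        (acc ++ [PySem.Int.toStr (PySem.Int.mod p.1 2)]) ++ [p.2])
      [PySem.List.pyGetD parts 0 ""]              -- parts[0]; split never returns an empty list
  PySem.Str.join "" pieces

-- ===== PRECONDITION & SPEC =====
def Spec_b_to_alt_zeros_ones (s : String) (out : String) : Prop := out = b_to_alt_zeros_ones_alt s
instance (s : String) (out : String) : Decidable (Spec_b_to_alt_zeros_ones s out) := by unfold Spec_b_to_alt_zeros_ones; infer_instance

-- ===== CLAIM (what is proved, stated in full; the proofs are below) =====
def Claim_equal_b_to_alt_zeros_ones : Prop := ∀ (s : String), Dom_b_to_alt_zeros_ones s → Spec_b_to_alt_zeros_ones s (b_to_alt_zeros_ones s)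

-- ===== LEMMAS AND PROOFS =====

-- common spec of A's loop: replace each 'b' by str(b % 2) with running counter b
def pvGo : List Char → Int → List String
  | [], _ => []
  | c :: t, b =>
      if c = 'b' then PySem.Int.toStr (PySem.Int.mod b 2) :: pvGo t (b + 1)
      else c.toString :: pvGo t b

-- the character-level result
def pvOut : List Char → Int → List Char
  | [], _ => []
  | c :: t, b =>
      if c = 'b' then PySem.Int.toChars (PySem.Int.mod b 2) ++ pvOut t (b + 1)
      else c :: pvOut t b

-- structural version of split on 'b'
def pvSplit : List Char → List (List Char)
  | [] => [[]]
  | c :: t =>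
      if c = 'b' then [] :: pvSplit t
      else match pvSplit t with
        | [] => [[c]]
        | h :: r => (c :: h) :: r

-- interleave the tail segments with alternating digits
def pvWeave : List (List Char) → Int → List Char
  | [], _ => []
  | p :: ps, b => PySem.Int.toChars (PySem.Int.mod b 2) ++ p ++ pvWeave ps (b + 1)

theorem pvSplit_ne_nil (l : List Char) : pvSplit l ≠ [] := by
  cases l with
  | nil => simp [pvSplit]
  | cons c t =>
      simp only [pvSplit]
      split_ifs
      · simp
      · cases h : pvSplit t <;> simp

theorem pvGetD_app {α : Type} (d x : α) (l₁ l₂ : List α) :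
    (l₁ ++ x :: l₂).getD l₁.length d = x := by
  simp [List.getD]

theorem pvSet_app {α : Type} (x v : α) (l₁ l₂ : List α) :
    (l₁ ++ x :: l₂).set l₁.length v = l₁ ++ v :: l₂ := by
  induction l₁ with
  | nil => rfl
  | cons a t ih => simp [ih]

theorem pvToString_eq_b (c : Char) : (Char.toString c = "b") ↔ c = 'b' := by
  constructor
  · intro h
    have h2 := congrArg String.toList h
    simpa [Char.toString] using h2
  · rintro rfl; rfl

-- A's loop computes pvGo
theorem pvA_loop (t : List Char) (pre : List String) (b : Int) :
    ((PySem.List.pyRange (pre.length : Int) ((pre.length : Int) + (t.length : Int)) 1).foldl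
      (fun (st : List String × Int) i =>
        if PySem.List.pyGetD st.1 i "" = "b"
        then (PySem.List.pySetD st.1 i (PySem.Int.toStr (PySem.Int.mod st.2 2)), st.2 + 1)
        else st)
      (pre ++ t.map Char.toString, b)).1 = pre ++ pvGo t b := by
  induction t generalizing pre b with
  | nil =>
      rw [PySem.List.pyRange_one_eq_nil (by simp)]
      simp [pvGo]
  | cons c t ih =>
      rw [PySem.List.pyRange_one_cons (by push_cast [List.length_cons]; omega)]
      rw [List.foldl_cons]
      simp only [List.map_cons, PySem.List.pyGetD_natCast, PySem.List.pySetD_natCast,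
        pvGetD_app, pvSet_app]
      by_cases hc : c = 'b'
      · rw [if_pos ((pvToString_eq_b c).2 hc)]
        have h1 : ((pre.length : Int) + 1) = (((pre ++ [PySem.Int.toStr (PySem.Int.mod b 2)]).length : Int)) := by
          simp
        have h2 : ((pre.length : Int) + ((c :: t).length : Int))
            = (((pre ++ [PySem.Int.toStr (PySem.Int.mod b 2)]).length : Int) + (t.length : Int)) := by
          simp; omega
        rw [h1, h2]
        have := ih (pre ++ [PySem.Int.toStr (PySem.Int.mod b 2)]) (b + 1)
        simpa [pvGo, hc] using this
      · rw [if_neg (fun h => hc ((pvToString_eq_b c).1 h))]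
        have h1 : ((pre.length : Int) + 1) = (((pre ++ [c.toString]).length : Int)) := by simp
        have h2 : ((pre.length : Int) + ((c :: t).length : Int))
            = (((pre ++ [c.toString]).length : Int) + (t.length : Int)) := by
          simp; omega
        rw [h1, h2]
        have := ih (pre ++ [c.toString]) b
        simpa [pvGo, hc] using this

-- flatten A's per-character strings to characters
theorem pvGo_flatten (l : List Char) (b : Int) :
    ((pvGo l b).map String.toList).flatten = pvOut l b := by
  induction l generalizing b with
  | nil => simp [pvGo, pvOut]
  | cons c t ih =>
      by_cases hc : c = 'b'
      · simp [pvGo, pvOut, hc, PySem.Int.toList_toStr, ih]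
      · simp [pvGo, pvOut, hc, Char.toString, ih]

-- splitOn's fuelled worker computes pvSplit
def pvConsHead (pre : List Char) : List (List Char) → List (List Char)
  | [] => [pre]
  | h :: t => (pre ++ h) :: t

theorem pvSplitOn_go (fuel : Nat) (l cur : List Char) (acc : List (List Char))
    (hf : l.length ≤ fuel) :
    PySem.Chars.splitOn.go ['b'] fuel l cur acc
      = acc.reverse ++ pvConsHead cur.reverse (pvSplit l) := by
  induction fuel generalizing l cur acc with
  | zero =>
      have hl : l = [] := List.eq_nil_of_length_eq_zero (Nat.le_zero.mp hf)
      subst hl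
      simp [PySem.Chars.splitOn.go, pvSplit, pvConsHead]
  | succ f ih =>
      cases l with
      | nil => simp [PySem.Chars.splitOn.go, pvSplit, pvConsHead]
      | cons c rest =>
          have hstep : PySem.Chars.splitOn.go ['b'] (f + 1) (c :: rest) cur acc
              = if List.isPrefixOf ['b'] (c :: rest)
                then PySem.Chars.splitOn.go ['b'] f (List.drop 1 (c :: rest)) [] (cur.reverse :: acc)
                else PySem.Chars.splitOn.go ['b'] f rest (c :: cur) acc := rfl
          rw [hstep]
          by_cases hc : c = 'b'
          · rw [if_pos (by simp [List.isPrefixOf, hc])]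
            rw [ih _ _ _ (by simpa using Nat.le_of_succ_le_succ hf)]
            cases hs : pvSplit rest with
            | nil => exact absurd hs (pvSplit_ne_nil rest)
            | cons h t => simp [pvSplit, hc, hs, pvConsHead]
          · rw [if_neg (by simp [List.isPrefixOf]; exact fun h => hc h.symm)]
            rw [ih _ _ _ (by simpa using Nat.le_of_succ_le_succ hf)]
            cases hs : pvSplit rest with
            | nil => simp [pvSplit, hc, hs, pvConsHead]
            | cons h t => simp [pvSplit, hc, hs, pvConsHead]

theorem pvSplitOn_eq (l : List Char) : PySem.Chars.splitOn l ['b'] = pvSplit l := by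
  unfold PySem.Chars.splitOn
  rw [pvSplitOn_go _ _ _ _ (by omega)]
  cases h : pvSplit l with
  | nil => exact absurd h (pvSplit_ne_nil l)
  | cons a t => simp [pvConsHead]

-- pvOut through the split
theorem pvOut_eq_weave (l : List Char) (b : Int) :
    ∀ h t, pvSplit l = h :: t → pvOut l b = h ++ pvWeave t b := by
  induction l generalizing b with
  | nil =>
      intro h t hs
      simp only [pvSplit, List.cons.injEq] at hs
      simp [← hs.1, ← hs.2, pvOut, pvWeave]
  | cons c r ih =>
      intro h t hs
      by_cases hc : c = 'b'
      · simp only [pvSplit, if_pos hc, List.cons.injEq] at hs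
        cases hr : pvSplit r with
        | nil => exact absurd hr (pvSplit_ne_nil r)
        | cons h' t' =>
            rw [← hs.2, ← hs.1, hr]
            simp [pvOut, hc, pvWeave, ih (b + 1) h' t' hr]
      · cases hr : pvSplit r with
        | nil => exact absurd hr (pvSplit_ne_nil r)
        | cons h' t' =>
            simp only [pvSplit, if_neg hc, hr, List.cons.injEq] at hs
            rw [← hs.2, ← hs.1]
            simp [pvOut, hc, ih b h' t' hr]

-- B's foldl, flattened
theorem pvB_loop (ps : List (List Char)) (k : Int) (acc : List String) :
    (((PySem.List.enumerate (ps.map String.ofList) k).foldl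
        (fun (acc : List String) p =>
          (acc ++ [PySem.Int.toStr (PySem.Int.mod p.1 2)]) ++ [p.2]) acc).map String.toList).flatten
      = (acc.map String.toList).flatten ++ pvWeave ps k := by
  induction ps generalizing k acc with
  | nil => simp [PySem.List.enumerate_nil, pvWeave]
  | cons p ps ih =>
      rw [List.map_cons, PySem.List.enumerate_cons, List.foldl_cons, ih]
      simp [pvWeave, PySem.Int.toList_toStr]

theorem pvFlatten_intersperse {α : Type} (l : List (List α)) :
    (List.intersperse ([] : List α) l).flatten = l.flatten := by
  induction l with
  | nil => simp
  | cons h t ih =>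
      cases t with
      | nil => simp
      | cons a r =>
          have hi : List.intersperse ([] : List α) (h :: a :: r)
              = h :: [] :: List.intersperse [] (a :: r) := rfl
          rw [hi]; simp only [List.flatten_cons] at ih ⊢; simp [ih]

theorem pvIntercalate_nil {α : Type} (l : List (List α)) :
    List.intercalate [] l = l.flatten := by
  unfold List.intercalate
  exact pvFlatten_intersperse l

-- ===== VERDICT (by name: the statement is the Claim_ definition above) =====
theorem b_to_alt_zeros_ones_spec : Claim_equal_b_to_alt_zeros_ones := by
  intro s _
  unfold Spec_b_to_alt_zeros_ones b_to_alt_zeros_ones b_to_alt_zeros_ones_alt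
  apply String.toList_inj.mp
  -- A side
  have hA := pvA_loop s.toList [] 0
  simp only [List.length_nil, Nat.cast_zero, List.nil_append, zero_add] at hA
  simp only [PySem.List.len_eq, List.length_map]
  rw [hA]
  -- B side: the split
  have hb : ("b" : String).toList = ['b'] := rfl
  have hsplit : (PySem.Str.split? s "b").getD []
      = (pvSplit s.toList).map String.ofList := by
    unfold PySem.Str.split? PySem.Chars.split?
    rw [hb]
    simp [pvSplitOn_eq]
  rw [hsplit]
  obtain ⟨h, t, hs⟩ : ∃ h t, pvSplit s.toList = h :: t := by
    cases hx : pvSplit s.toList with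
    | nil => exact absurd hx (pvSplit_ne_nil s.toList)
    | cons a b => exact ⟨a, b, rfl⟩
  rw [hs]
  rw [List.map_cons, PySem.List.slice_from_one, List.tail_cons]
  have hget : PySem.List.pyGetD (String.ofList h :: t.map String.ofList) 0 ""
      = String.ofList h := by
    simp [PySem.List.pyGetD, PySem.List.pyIdx?, PySem.List.pyGet?]
  rw [hget]
  -- flatten both joins
  rw [PySem.Str.toList_join, PySem.Str.toList_join]
  have h0 : ("" : String).toList = [] := rfl
  rw [h0]
  unfold PySem.Chars.join
  rw [pvIntercalate_nil, pvIntercalate_nil]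
  rw [pvGo_flatten]
  rw [pvB_loop t 0 [String.ofList h]]
  simp only [List.map_cons, List.map_nil, String.toList_ofList, List.flatten_cons,
    List.flatten_nil, List.append_nil]
  exact pvOut_eq_weave s.toList 0 h t hs
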